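-- pv_equiv track=rewrite | github.com/iFangg/COMP2041 | test08/three_vowel_echo.py | three_vowels
-- ===== SOURCE A (Python) =====
-- def three_vowels(string):
--     vowels = ['a', 'e', 'i', 'o', 'u']
--     counter = 0
--     for letter in string:
--         if letter in vowels: counter += 1
--         else: counter = 0
--         if counter == 3: return True
--
--     return False
-- ===== SOURCE B (Python) =====
-- def three_vowels(string):
--     vowels = 'aeiou'
--     return any(a in vowels and b in vowels and c in vowels
--                for a, b, c in zip(string, string[1:], string[2:]))
-- ===== Notes on version B (the rewrite author's own statement) =====
-- stated objective: idiomatic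
-- what changed: Replaced the stateful counter/reset scan with early return by a sliding-window check over zip(s, s[1:], s[2:]) asking whether any three consecutive characters are all vowels.
import Mathlib
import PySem

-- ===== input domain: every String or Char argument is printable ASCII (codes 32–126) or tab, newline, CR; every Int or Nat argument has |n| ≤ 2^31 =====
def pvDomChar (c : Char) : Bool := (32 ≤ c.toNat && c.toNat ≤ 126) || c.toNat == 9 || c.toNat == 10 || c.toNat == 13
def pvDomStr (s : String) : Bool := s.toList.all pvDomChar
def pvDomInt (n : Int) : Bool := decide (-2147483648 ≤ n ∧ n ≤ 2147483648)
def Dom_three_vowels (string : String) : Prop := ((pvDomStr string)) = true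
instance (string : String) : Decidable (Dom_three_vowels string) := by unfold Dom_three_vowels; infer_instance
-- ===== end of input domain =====

-- B replaces A's counter/reset scan by an idiomatic sliding-window 'any' over zip(s, s[1:], s[2:]); same result, same O(n) cost.

-- ===== PORT A =====
-- the for-loop with early 'return True': structural recursion over the characters carrying 'counter'
def three_vowels_loop (vowels : List Char) : List Char → Int → Bool
  | [], _ => false
  | letter :: rest, counter =>
    let counter' := if vowels.contains letter then counter + 1 else 0
    if counter' == 3 then true else three_vowels_loop vowels rest counter'

def three_vowels (string : String) : Bool :=
  three_vowels_loop ['a', 'e', 'i', 'o', 'u'] string.toList 0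

-- ===== PORT B =====
def bVowel (c : Char) : Bool := "aeiou".toList.contains c

-- 'any(... for a,b,c in zip(s, s[1:], s[2:]))': recursion over the window of three consecutive characters
def bWindowAny : List Char → Bool
  | a :: b :: c :: rest => (bVowel a && bVowel b && bVowel c) || bWindowAny (b :: c :: rest)
  | _ => false

def three_vowels_alt (string : String) : Bool := bWindowAny string.toList

-- ===== PRECONDITION & SPEC =====
def Spec_three_vowels (string : String) (out : Bool) : Prop := out = three_vowels_alt string
instance (string : String) (out : Bool) : Decidable (Spec_three_vowels string out) := by unfold Spec_three_vowels; infer_instance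

-- ===== CLAIM (what is proved, stated in full; the proofs are below) =====
def Claim_equal_three_vowels : Prop := ∀ (string : String), Dom_three_vowels string → Spec_three_vowels string (three_vowels string)

-- ===== LEMMAS AND PROOFS =====
def pvOne : List Char → Bool
  | a :: _ => bVowel a
  | _ => false

def pvTwo : List Char → Bool
  | a :: b :: _ => bVowel a && bVowel b
  | _ => false

lemma pv_contains_eq (c : Char) :
    (['a', 'e', 'i', 'o', 'u'] : List Char).contains c = bVowel c := rfl

lemma pv_key : ∀ l : List Char,
    three_vowels_loop ['a', 'e', 'i', 'o', 'u'] l 0 = bWindowAny l ∧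
    three_vowels_loop ['a', 'e', 'i', 'o', 'u'] l 1 = (pvTwo l || bWindowAny l) ∧
    three_vowels_loop ['a', 'e', 'i', 'o', 'u'] l 2 = (pvOne l || bWindowAny l) := by
  intro l
  induction l with
  | nil => simp [three_vowels_loop, bWindowAny, pvOne, pvTwo]
  | cons a r ih =>
    obtain ⟨ih0, ih1, ih2⟩ := ih
    cases hva : bVowel a <;>
      cases r with
      | nil =>
        simp only [three_vowels_loop, pv_contains_eq, hva, bWindowAny, pvOne, pvTwo]; decide
      | cons b r' =>
        cases r' with
        | nil =>
          cases hvb : bVowel b <;>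
            (simp only [three_vowels_loop, pv_contains_eq, hva, hvb, bWindowAny, pvOne, pvTwo]; decide)
        | cons c r'' =>
          cases hvb : bVowel b <;> cases hvc : bVowel c <;>
            simp only [three_vowels_loop, pv_contains_eq, hva, hvb, hvc, bWindowAny,
              pvOne, pvTwo] at ih0 ih1 ih2 ⊢ <;>
            simp_all

-- ===== VERDICT (by name: the statement is the Claim_ definition above) =====
theorem three_vowels_spec : Claim_equal_three_vowels := by
  intro s _
  unfold Spec_three_vowels three_vowels three_vowels_alt
  exact (pv_key s.toList).1
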